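-- pv_equiv track=rewrite | github.com/riddhimanrana/orion-research | .archive/scripts/validate_pipeline_results.py | get_detections_for_frame
-- ===== SOURCE A (Python) =====
-- def get_detections_for_frame(frame_detections: dict, frame_idx: int) -> list:
--     """Get detections for a specific frame."""
--     # Find closest frame
--     if frame_idx in frame_detections:
--         return frame_detections[frame_idx]
--
--     # Find closest
--     frames = sorted(frame_detections.keys())
--     for f in frames:
--         if f >= frame_idx:
--             return frame_detections[f]
--     return frame_detections.get(frames[-1], []) if frames else []
-- ===== SOURCE B (Python) =====
-- def get_detections_for_frame(frame_detections: dict, frame_idx: int) -> list: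
--     """Get detections for the nearest frame >= frame_idx (fallback: the largest frame)."""
--     if not frame_detections:
--         return []
--     candidates = [f for f in frame_detections if f >= frame_idx]
--     if candidates:
--         return frame_detections[min(candidates)]
--     return frame_detections[max(frame_detections)]
-- ===== Notes on version B (the rewrite author's own statement) =====
-- stated objective: simpler
-- what changed: Replaces sort-then-scan (sorted keys, linear scan for the first key >= frame_idx, last-element fallback) with a direct selection: min of the qualifying keys, else max of all keys; no sorting at all.
import Mathlib
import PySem

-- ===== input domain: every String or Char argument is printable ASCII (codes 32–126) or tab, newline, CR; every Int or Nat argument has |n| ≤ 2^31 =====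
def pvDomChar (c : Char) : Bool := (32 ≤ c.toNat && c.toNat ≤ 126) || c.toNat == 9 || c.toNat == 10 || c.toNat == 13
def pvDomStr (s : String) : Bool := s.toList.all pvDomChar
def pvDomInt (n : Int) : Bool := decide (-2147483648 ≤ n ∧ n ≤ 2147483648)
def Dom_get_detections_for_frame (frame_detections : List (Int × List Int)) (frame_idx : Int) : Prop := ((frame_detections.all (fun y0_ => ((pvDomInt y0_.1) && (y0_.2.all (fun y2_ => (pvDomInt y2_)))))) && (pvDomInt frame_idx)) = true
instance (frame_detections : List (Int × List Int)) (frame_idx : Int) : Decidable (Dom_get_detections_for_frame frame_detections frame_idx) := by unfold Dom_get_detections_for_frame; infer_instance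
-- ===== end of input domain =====

-- B replaces A's sort-then-scan by a direct min/max selection over the keys (no sorting); objective: simpler.

-- ===== PORT A =====
-- the 'for f in frames: if f >= frame_idx: return …' loop of A
def pvFindA (frame_idx : Int) : List Int → Option Int
  | [] => none
  | f :: rest => if frame_idx ≤ f then some f else pvFindA frame_idx rest

def get_detections_for_frame (frame_detections : List (Int × List Int)) (frame_idx : Int) : List Int :=
  let d := PySem.Dict.mk frame_detections
  if d.contains frame_idx then
    d.getD frame_idx []   -- key present (just checked), so d[frame_idx] = getD here
  else
    let frames := PySem.List.sorted (PySem.Dict.keys d) (fun x => x) false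
    match pvFindA frame_idx frames with
    | some f => d.getD f []   -- f ∈ frames = keys, so d[f] = getD here
    | none =>
      -- 'frame_detections.get(frames[-1], []) if frames else []': pyGet? frames (-1) is none exactly when frames = []
      match PySem.List.pyGet? frames (-1) with
      | some last => d.getD last []
      | none => []

-- ===== PORT B =====
def get_detections_for_frame_alt (frame_detections : List (Int × List Int)) (frame_idx : Int) : List Int :=
  if frame_detections = [] then []
  else
    let d := PySem.Dict.mk frame_detections
    let candidates := (PySem.Dict.keys d).filter (fun f => frame_idx ≤ f)
    match PySem.List.min? candidates (fun x => x) with   -- 'if candidates: … min(candidates) …'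
    | some m => d.getD m []   -- m ∈ keys, so d[m] = getD here
    | none =>
      match PySem.List.max? (PySem.Dict.keys d) (fun x => x) with   -- keys nonempty, max total here
      | some M => d.getD M []
      | none => []

-- ===== PRECONDITION & SPEC =====
def Spec_get_detections_for_frame (frame_detections : List (Int × List Int)) (frame_idx : Int) (out : List Int) : Prop := out = get_detections_for_frame_alt frame_detections frame_idx
instance (frame_detections : List (Int × List Int)) (frame_idx : Int) (out : List Int) : Decidable (Spec_get_detections_for_frame frame_detections frame_idx out) := by unfold Spec_get_detections_for_frame; infer_instance

-- ===== CLAIM (what is proved, stated in full; the proofs are below) =====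
def Claim_equal_get_detections_for_frame : Prop := ∀ (frame_detections : List (Int × List Int)) (frame_idx : Int), Dom_get_detections_for_frame frame_detections frame_idx → Spec_get_detections_for_frame frame_detections frame_idx (get_detections_for_frame frame_detections frame_idx)

-- ===== LEMMAS AND PROOFS =====

lemma pvFindA_some (idx f : Int) (l : List Int) (h : pvFindA idx l = some f) :
    f ∈ l ∧ idx ≤ f := by
  induction l with
  | nil => simp [pvFindA] at h
  | cons x rest ih =>
    by_cases hx : idx ≤ x
    · simp [pvFindA, hx] at h; subst h; exact ⟨List.mem_cons_self, hx⟩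
    · simp [pvFindA, hx] at h
      obtain ⟨hm, hle⟩ := ih h
      exact ⟨List.mem_cons_of_mem _ hm, hle⟩

lemma pvFindA_first (idx f : Int) (l : List Int) (hp : l.Pairwise (· ≤ ·))
    (h : pvFindA idx l = some f) : ∀ g ∈ l, idx ≤ g → f ≤ g := by
  induction l with
  | nil => simp [pvFindA] at h
  | cons x rest ih =>
    rcases List.pairwise_cons.mp hp with ⟨hx, hrest⟩
    by_cases hix : idx ≤ x
    · simp [pvFindA, hix] at h; subst h
      intro g hg _
      rcases List.mem_cons.mp hg with rfl | hg'
      · exact le_refl _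
      · exact hx g hg'
    · simp [pvFindA, hix] at h
      intro g hg hig
      rcases List.mem_cons.mp hg with rfl | hg'
      · exact absurd hig hix
      · exact ih hrest h g hg' hig

lemma pvFindA_none (idx : Int) (l : List Int) (h : pvFindA idx l = none) :
    ∀ g ∈ l, g < idx := by
  induction l with
  | nil => intro g hg; simp at hg
  | cons x rest ih =>
    by_cases hx : idx ≤ x
    · simp [pvFindA, hx] at h
    · simp [pvFindA, hx] at h
      intro g hg
      rcases List.mem_cons.mp hg with rfl | hg'
      · omega
      · exact ih h g hg'

lemma pairwise_le_getLast (l : List Int) (x : Int) (hp : l.Pairwise (· ≤ ·))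
    (h : l.getLast? = some x) : x ∈ l ∧ ∀ g ∈ l, g ≤ x := by
  induction l with
  | nil => simp at h
  | cons a rest ih =>
    rcases List.pairwise_cons.mp hp with ⟨ha, hrest⟩
    cases rest with
    | nil =>
      simp_all
    | cons b t =>
      rw [List.getLast?_cons_cons] at h
      obtain ⟨hm, hall⟩ := ih hrest h
      refine ⟨List.mem_cons_of_mem _ hm, ?_⟩
      intro g hg
      rcases List.mem_cons.mp hg with rfl | hg'
      · exact ha x hm
      · exact hall g hg'

theorem get_detections_for_frame_spec : Claim_equal_get_detections_for_frame := by
  intro fd idx _dom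
  unfold Spec_get_detections_for_frame get_detections_for_frame get_detections_for_frame_alt
  simp only []
  set d := PySem.Dict.mk fd with hd
  have hkeys : PySem.Dict.keys d = fd.map (·.1) := by simp [hd, PySem.Dict.keys]
  set cands := (PySem.Dict.keys d).filter (fun f => decide (idx ≤ f)) with hcands
  have hmemc : ∀ g : Int, g ∈ cands ↔ g ∈ PySem.Dict.keys d ∧ idx ≤ g := by
    intro g; simp [hcands]
  set frames := PySem.List.sorted (PySem.Dict.keys d) (fun x => x) false with hframes
  have hperm : ∀ g : Int, g ∈ frames ↔ g ∈ PySem.Dict.keys d := by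
    intro g; exact PySem.List.mem_sorted (PySem.Dict.keys d) (fun x => x) false g
  have hpair : frames.Pairwise (· ≤ ·) := PySem.List.sorted_pairwise (PySem.Dict.keys d) (fun x => x)
  have hne : ∀ g : Int, g ∈ PySem.Dict.keys d → fd ≠ [] := by
    intro g hg hnil; rw [hkeys, hnil] at hg; simp at hg
  by_cases hc : PySem.Dict.contains d idx
  · -- exact key present: min of candidates is idx itself
    have hks : idx ∈ PySem.Dict.keys d := (PySem.Dict.contains_iff_mem_keys d idx).mp hc
    have hic : idx ∈ cands := (hmemc idx).mpr ⟨hks, le_refl idx⟩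
    have hcne : cands ≠ [] := by intro h; rw [h] at hic; simp at hic
    obtain ⟨m, hm⟩ : ∃ m, PySem.List.min? cands (fun x => x) = some m := by
      cases hmin : PySem.List.min? cands (fun x => x) with
      | none => exact absurd ((PySem.List.min?_eq_none_iff cands (fun x => x)).mp hmin) hcne
      | some m => exact ⟨m, rfl⟩
    have hmmem := PySem.List.min?_mem hm
    have hmi : m = idx := le_antisymm (PySem.List.min?_isMin hm idx hic) ((hmemc m).mp hmmem).2
    rw [hmi] at hm
    simp [hc, if_neg (hne idx hks), hm]
  · simp only [hc, if_false, Bool.false_eq_true]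
    cases hfind : pvFindA idx frames with
    | some f =>
      obtain ⟨hfmem, hfle⟩ := pvFindA_some idx f frames hfind
      have hfk : f ∈ PySem.Dict.keys d := (hperm f).mp hfmem
      have hfc : f ∈ cands := (hmemc f).mpr ⟨hfk, hfle⟩
      obtain ⟨m, hm⟩ : ∃ m, PySem.List.min? cands (fun x => x) = some m := by
        cases hmin : PySem.List.min? cands (fun x => x) with
        | none =>
          have := (PySem.List.min?_eq_none_iff cands (fun x => x)).mp hmin
          rw [this] at hfc; simp at hfc
        | some m => exact ⟨m, rfl⟩
      have hmmem := PySem.List.min?_mem hm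
      obtain ⟨hmk, hmle⟩ := (hmemc m).mp hmmem
      have hmf : m = f := le_antisymm (PySem.List.min?_isMin hm f hfc)
        (pvFindA_first idx f frames hpair hfind m ((hperm m).mpr hmk) hmle)
      rw [hmf] at hm
      simp [if_neg (hne f hfk), hm]
    | none =>
      have hall : ∀ g ∈ PySem.Dict.keys d, g < idx := by
        intro g hg; exact pvFindA_none idx frames hfind g ((hperm g).mpr hg)
      have hcnil : cands = [] := by
        cases h : cands with
        | nil => rfl
        | cons a t =>
          have : a ∈ cands := by rw [h]; exact List.mem_cons_self
          obtain ⟨hak, hale⟩ := (hmemc a).mp this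
          exact absurd hale (by exact not_le.mpr (hall a hak))
      have hminn : PySem.List.min? cands (fun x => x) = none :=
        (PySem.List.min?_eq_none_iff cands (fun x => x)).mpr hcnil
      by_cases hfd : fd = []
      · subst hfd
        simp [PySem.List.pyGet?_neg_one, hframes, hkeys, PySem.List.sorted]
      · have hfne : frames ≠ [] := by
          intro h
          have := (PySem.List.sorted_eq_nil_iff (PySem.Dict.keys d) (fun x => x) false).mp (hframes ▸ h)
          rw [hkeys] at this
          exact hfd (List.map_eq_nil_iff.mp this)
        rw [PySem.List.pyGet?_neg_one]
        obtain ⟨last, hlast⟩ : ∃ x, frames.getLast? = some x := by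
          cases h : frames.getLast? with
          | none => exact absurd (List.getLast?_eq_none_iff.mp h) hfne
          | some x => exact ⟨x, rfl⟩
        obtain ⟨hlmem, hlmax⟩ := pairwise_le_getLast frames last hpair hlast
        have hkne : PySem.Dict.keys d ≠ [] := by
          intro h; rw [hkeys] at h; exact hfd (List.map_eq_nil_iff.mp h)
        obtain ⟨M, hM⟩ : ∃ M, PySem.List.max? (PySem.Dict.keys d) (fun x => x) = some M := by
          cases h : PySem.List.max? (PySem.Dict.keys d) (fun x => x) with
          | none => exact absurd ((PySem.List.max?_eq_none_iff (PySem.Dict.keys d) (fun x => x)).mp h) hkne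
          | some M => exact ⟨M, rfl⟩
        have hMmem := PySem.List.max?_mem hM
        have : last = M := le_antisymm (PySem.List.max?_isMax hM last ((hperm last).mp hlmem))
          (hlmax M ((hperm M).mpr hMmem))
        subst this
        simp [hlast, if_neg hfd, hminn, hM]
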